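-- pv_equiv track=rewrite | github.com/pypi-data/pypi-mirror-403 | packages/mod2pip/mod2pip-0.7.0-py3-none-any.whl/mod2pip/mod2pip.py | _parse_metadata_dependencies
-- ===== SOURCE A (Python) =====
-- def _parse_metadata_dependencies(content):
--     """Parse dependencies from METADATA or PKG-INFO content."""
--     dependencies = []
--
--     for line in content.split('\n'):
--         line = line.strip()
--         if line.startswith('Requires-Dist:'):
--             dep = line.split(':', 1)[1].strip()
--             # Remove environment markers like "; python_version >= '3.6'"
--             dep = dep.split(';')[0].strip()
--             if dep:
--                 dependencies.append(dep)
--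
--     return dependencies
-- ===== SOURCE B (Python) =====
-- def _parse_metadata_dependencies(content):
--     """Single character-level scan: skip line-leading whitespace, match the
--     'Requires-Dist:' prefix in place, capture up to ';' or end of line, strip.
--     No per-line split/startswith/split(':')/split(';') passes."""
--     deps = []
--     i = 0
--     n = len(content)
--     while True:
--         # skip exactly the whitespace str.strip() would remove from the line front
--         while i < n and content[i] != '\n' and content[i].isspace():
--             i += 1
--         if content.startswith('Requires-Dist:', i):
--             i += 14
--             start = i
--             while i < n and content[i] != ';' and content[i] != '\n':
--                 i += 1
--             dep = content[start:i].strip()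
--             if dep:
--                 deps.append(dep)
--         while i < n and content[i] != '\n':
--             i += 1
--         if i >= n:
--             break
--         i += 1
--     return deps
-- ===== Notes on version B (the rewrite author's own statement) =====
-- stated objective: alternative
-- what changed: Replaced A's per-line pipeline (split on newlines, strip, prefix test, split at the first colon, split at semicolons) by a single character-level scanner over the whole string that skips a line's leading whitespace, matches the header prefix in place and captures the value up to the first semicolon or end of line.
import Mathlib
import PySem

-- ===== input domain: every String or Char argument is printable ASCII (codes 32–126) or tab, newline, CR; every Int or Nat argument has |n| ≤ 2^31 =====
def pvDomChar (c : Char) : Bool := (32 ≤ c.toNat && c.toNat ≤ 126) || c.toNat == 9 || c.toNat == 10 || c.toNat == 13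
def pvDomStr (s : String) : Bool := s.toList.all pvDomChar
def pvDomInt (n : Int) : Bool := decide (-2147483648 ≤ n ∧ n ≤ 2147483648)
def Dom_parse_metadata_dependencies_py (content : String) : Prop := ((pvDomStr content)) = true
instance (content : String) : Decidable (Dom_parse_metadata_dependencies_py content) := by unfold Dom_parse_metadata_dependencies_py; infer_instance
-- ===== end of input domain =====

-- B replaces A's per-line split/strip/startswith/split(':')/split(';') pipeline by a single
-- character-level scanner over the whole string (alternative decomposition, same asymptotic cost).

-- ===== PORT A =====
def parse_metadata_dependencies_py (content : String) : List String :=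
  ((PySem.Chars.splitOn content.toList "\n".toList).foldl (fun dependencies line =>
      let line := PySem.Chars.strip line
      if PySem.Chars.startswith line "Requires-Dist:".toList then
        let dep := PySem.Chars.strip (PySem.List.pyGetD (PySem.Chars.splitOnMax line ":".toList 1) 1 [])
        let dep := PySem.Chars.strip (PySem.List.pyGetD (PySem.Chars.splitOn dep ";".toList) 0 [])
        if dep ≠ [] then dependencies ++ [dep] else dependencies
      else dependencies) []).map String.ofList

-- ===== PORT B =====
-- character classes of Source B's three scanning loops
def pvLineWs (c : Char) : Bool := c != '\n' && PySem.Chars.isspace c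
def pvStop (c : Char) : Bool := c != ';' && c != '\n'
def pvToNl (c : Char) : Bool := c != '\n'

-- the while-True scan of Source B: skip line-leading whitespace, match the prefix in place,
-- capture to ';' / end of line, then skip past the next '\n'
def pvScanB (cs : List Char) (deps : List (List Char)) : List (List Char) :=
  if "Requires-Dist:".toList.isPrefixOf (cs.dropWhile pvLineWs) then
    let dep := PySem.Chars.strip (((cs.dropWhile pvLineWs).drop 14).takeWhile pvStop)
    match h : (((cs.dropWhile pvLineWs).drop 14).dropWhile pvStop).dropWhile pvToNl with
    | [] => if dep ≠ [] then deps ++ [dep] else deps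
    | _ :: t => pvScanB t (if dep ≠ [] then deps ++ [dep] else deps)
  else
    match h : (cs.dropWhile pvLineWs).dropWhile pvToNl with
    | [] => deps
    | _ :: t => pvScanB t deps
termination_by cs.length
decreasing_by
  · have h1 := List.length_dropWhile_le pvToNl (((cs.dropWhile pvLineWs).drop 14).dropWhile pvStop)
    have h2 := List.length_dropWhile_le pvStop ((cs.dropWhile pvLineWs).drop 14)
    have h3 : ((cs.dropWhile pvLineWs).drop 14).length ≤ (cs.dropWhile pvLineWs).length := by
      simp [List.length_drop]
    have h4 := List.length_dropWhile_le pvLineWs cs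
    rw [h] at h1; simp at h1; omega
  · have h1 := List.length_dropWhile_le pvToNl (cs.dropWhile pvLineWs)
    have h4 := List.length_dropWhile_le pvLineWs cs
    rw [h] at h1; simp at h1; omega

def parse_metadata_dependencies_py_alt (content : String) : List String :=
  (pvScanB content.toList []).map String.ofList

-- ===== PRECONDITION & SPEC =====
def Spec_parse_metadata_dependencies_py (content : String) (out : List String) : Prop := out = parse_metadata_dependencies_py_alt content
instance (content : String) (out : List String) : Decidable (Spec_parse_metadata_dependencies_py content out) := by unfold Spec_parse_metadata_dependencies_py; infer_instance

-- ===== CLAIM (what is proved, stated in full; the proofs are below) =====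
def Claim_equal_parse_metadata_dependencies_py : Prop := ∀ (content : String), Dom_parse_metadata_dependencies_py content → Spec_parse_metadata_dependencies_py content (parse_metadata_dependencies_py content)

-- ===== LEMMAS AND PROOFS =====

def pvSplitC (c : Char) : List Char → List (List Char)
  | [] => [[]]
  | a :: r => if a = c then [] :: pvSplitC c r
              else match pvSplitC c r with
                   | [] => [[a]]
                   | h :: t => (a :: h) :: t

lemma pvSplitC_ne_nil (c : Char) (l : List Char) : pvSplitC c l ≠ [] := by
  induction l with
  | nil => simp [pvSplitC]
  | cons a r ih =>
    simp only [pvSplitC]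
    split
    · simp
    · split
      · simp
      · simp

lemma pv_headI_tail {α : Type} [Inhabited α] {l : List α} (h : l ≠ []) : l.headI :: l.tail = l := by
  cases l with
  | nil => exact absurd rfl h
  | cons a t => rfl

lemma pv_splitOn_go_single (c : Char) : ∀ (fuel : Nat) (l cur acc : _),
    l.length ≤ fuel →
    PySem.Chars.splitOn.go [c] fuel l cur acc
      = acc.reverse ++ (cur.reverse ++ ((pvSplitC c l).headI : List Char)) :: (pvSplitC c l).tail := by
  intro fuel
  induction fuel with
  | zero =>
    intro l cur acc h
    have : l = [] := List.length_eq_zero_iff.mp (Nat.le_zero.mp h)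
    subst this
    simp [PySem.Chars.splitOn.go, pvSplitC]
  | succ f ih =>
    intro l cur acc h
    cases l with
    | nil => simp [PySem.Chars.splitOn.go, pvSplitC]
    | cons a rest =>
      simp only [PySem.Chars.splitOn.go]
      by_cases hac : a = c
      · subst hac
        have hpre : [a].isPrefixOf (a :: rest) = true := by simp [List.isPrefixOf]
        rw [if_pos hpre]
        simp only [List.length_cons] at h
        have hdrop : List.drop [a].length (a :: rest) = rest := by simp
        rw [hdrop, ih rest [] (cur.reverse :: acc) (by omega)]
        have hne := pvSplitC_ne_nil a rest
        simp only [pvSplitC]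
        simp
        exact pv_headI_tail hne
      · have hpre : [c].isPrefixOf (a :: rest) = false := by
          simp [List.isPrefixOf]
          intro hh; exact absurd hh.symm hac
        rw [if_neg (by simp [hpre])]
        simp only [List.length_cons] at h
        rw [ih rest (a :: cur) acc (Nat.le_of_succ_le_succ h)]
        have hne := pvSplitC_ne_nil c rest
        simp only [pvSplitC, if_neg hac]
        cases hsp : pvSplitC c rest with
        | nil => exact absurd hsp hne
        | cons hd tl => simp


lemma pv_splitOn_single (c : Char) (l : List Char) :
    PySem.Chars.splitOn l [c] = pvSplitC c l := by
  unfold PySem.Chars.splitOn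
  rw [pv_splitOn_go_single c (l.length + 1) l [] [] (by omega)]
  simpa using pv_headI_tail (pvSplitC_ne_nil c l)

lemma pv_splitOnMax_go_zero (sep : List Char) : ∀ (fuel : Nat) (l : List Char) (acc : List (List Char)),
    PySem.Chars.splitOnMax.go sep fuel 0 l [] acc = acc.reverse ++ [l] := by
  intro fuel l acc
  cases fuel with
  | zero => simp [PySem.Chars.splitOnMax.go]
  | succ f =>
    cases l with
    | nil => simp [PySem.Chars.splitOnMax.go]
    | cons a rest => simp [PySem.Chars.splitOnMax.go]

lemma pv_splitOnMax_go_one : ∀ (pre : List Char) (fuel : Nat) (t cur : List Char) (accs : List (List Char)),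
    (':' : Char) ∉ pre → (pre ++ ':' :: t).length ≤ fuel →
    PySem.Chars.splitOnMax.go [':'] fuel 1 (pre ++ ':' :: t) cur accs
      = accs.reverse ++ [cur.reverse ++ pre, t] := by
  intro pre
  induction pre with
  | nil =>
    intro fuel t cur accs _ hlen
    cases fuel with
    | zero => simp at hlen
    | succ f =>
      simp only [List.nil_append]
      simp only [PySem.Chars.splitOnMax.go]
      have hpre : [(':' : Char)].isPrefixOf (':' :: t) = true := by simp [List.isPrefixOf]
      simp only [hpre, if_true]
      norm_num
      rw [pv_splitOnMax_go_zero [':'] f t (cur.reverse :: accs)]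
      simp
  | cons a pre' ih =>
    intro fuel t cur accs hnm hlen
    cases fuel with
    | zero => simp at hlen
    | succ f =>
      simp only [List.cons_append]
      simp only [PySem.Chars.splitOnMax.go]
      have ha : a ≠ ':' := fun hh => hnm (by simp [hh])
      have hpre : [(':' : Char)].isPrefixOf (a :: (pre' ++ ':' :: t)) = false := by
        simp [List.isPrefixOf]
        intro hh; exact absurd hh.symm ha
      simp only [hpre]
      norm_num
      rw [ih f t (a :: cur) accs (fun hh => hnm (by simp [hh])) (by simp at hlen ⊢; omega)]
      simp

lemma pv_splitOnMax_colon (pre t : List Char) (h : (':' : Char) ∉ pre) :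
    PySem.Chars.splitOnMax (pre ++ ':' :: t) [':'] 1 = [pre, t] := by
  unfold PySem.Chars.splitOnMax
  rw [if_neg (by norm_num)]
  rw [show ((1 : Int)).toNat = 1 from rfl]
  rw [pv_splitOnMax_go_one pre ((pre ++ ':' :: t).length + 1) t [] [] h (by omega)]
  simp

lemma pv_dropWhile_congr {p q : Char → Bool} {l : List Char} (h : ∀ x ∈ l, p x = q x) :
    l.dropWhile p = l.dropWhile q := by
  induction l with
  | nil => rfl
  | cons a r ih =>
    simp only [List.dropWhile_cons]
    rw [h a (by simp)]
    split
    · exact ih (fun x hx => h x (by simp [hx]))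
    · rfl

lemma pv_takeWhile_congr {p q : Char → Bool} {l : List Char} (h : ∀ x ∈ l, p x = q x) :
    l.takeWhile p = l.takeWhile q := by
  induction l with
  | nil => rfl
  | cons a r ih =>
    simp only [List.takeWhile_cons]
    rw [h a (by simp)]
    split
    · rw [ih (fun x hx => h x (by simp [hx]))]
    · rfl

lemma pv_rstrip_decomp (v : List Char) :
    PySem.Chars.rstrip v ++ (v.reverse.takeWhile PySem.Chars.isspace).reverse = v := by
  simp only [PySem.Chars.rstrip]
  rw [← List.reverse_append, List.takeWhile_append_dropWhile, List.reverse_reverse]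

lemma pv_mem_rtail {v : List Char} {c : Char}
    (h : c ∈ (v.reverse.takeWhile PySem.Chars.isspace).reverse) : PySem.Chars.isspace c = true :=
  List.mem_takeWhile_imp (List.mem_reverse.mp h)

lemma pv_lstrip_prepend_ws {sp x : List Char} (h : ∀ c ∈ sp, PySem.Chars.isspace c = true) :
    PySem.Chars.lstrip (sp ++ x) = PySem.Chars.lstrip x := by
  simp only [PySem.Chars.lstrip, List.dropWhile_append]
  rw [List.dropWhile_eq_nil_iff.mpr h]
  simp

lemma pv_strip_prepend_ws {sp x : List Char} (h : ∀ c ∈ sp, PySem.Chars.isspace c = true) :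
    PySem.Chars.strip (sp ++ x) = PySem.Chars.strip x := by
  simp only [PySem.Chars.strip, pv_lstrip_prepend_ws h]

lemma pv_rstrip_append_ws {x sp : List Char} (h : ∀ c ∈ sp, PySem.Chars.isspace c = true) :
    PySem.Chars.rstrip (x ++ sp) = PySem.Chars.rstrip x := by
  simp only [PySem.Chars.rstrip, List.reverse_append, List.dropWhile_append]
  rw [List.dropWhile_eq_nil_iff.mpr (fun c hc => h c (List.mem_reverse.mp hc))]
  simp

lemma pv_strip_append_ws {x sp : List Char} (h : ∀ c ∈ sp, PySem.Chars.isspace c = true) :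
    PySem.Chars.strip (x ++ sp) = PySem.Chars.strip x := by
  simp only [PySem.Chars.strip]
  by_cases hx : PySem.Chars.lstrip x = []
  · have h1 : PySem.Chars.lstrip (x ++ sp) = [] := by
      simp only [PySem.Chars.lstrip, List.dropWhile_append] at hx ⊢
      rw [hx]
      simp
      exact h
    rw [h1, hx]
  · have h1 : PySem.Chars.lstrip (x ++ sp) = PySem.Chars.lstrip x ++ sp := by
      simp only [PySem.Chars.lstrip, List.dropWhile_append] at hx ⊢
      rw [if_neg (by simpa using hx)]
    rw [h1, pv_rstrip_append_ws h]

lemma pv_rstrip_prefix (u : List Char) : PySem.Chars.rstrip u <+: u :=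
  ⟨(u.reverse.takeWhile PySem.Chars.isspace).reverse, pv_rstrip_decomp u⟩

lemma pv_rstrip_append_keep {q t : List Char} {a : Char} (ha : PySem.Chars.isspace a = false) :
    PySem.Chars.rstrip ((q ++ [a]) ++ t) = (q ++ [a]) ++ PySem.Chars.rstrip t := by
  simp only [PySem.Chars.rstrip, List.reverse_append, List.dropWhile_append]
  by_cases he : (List.dropWhile PySem.Chars.isspace t.reverse).isEmpty = true
  · have he' : List.dropWhile PySem.Chars.isspace t.reverse = [] := by simpa using he
    rw [if_pos he, he']
    simp [ha]
  · rw [if_neg he]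
    simp

-- ';' is not whitespace, so whitespace characters pass the capture predicate
lemma pv_ws_q {c : Char} (h : PySem.Chars.isspace c = true) : (c != ';') = true := by
  by_cases hc : c = ';'
  · subst hc; exact absurd h (by decide)
  · simp [hc]

lemma pv_strip_takeWhile_lstrip (v : List Char) :
    PySem.Chars.strip ((PySem.Chars.lstrip v).takeWhile (fun a => a != ';'))
      = PySem.Chars.strip (v.takeWhile (fun a => a != ';')) := by
  have hdec : v.takeWhile PySem.Chars.isspace ++ PySem.Chars.lstrip v = v := by
    simp [PySem.Chars.lstrip, List.takeWhile_append_dropWhile]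
  have hws : ∀ c ∈ v.takeWhile PySem.Chars.isspace, PySem.Chars.isspace c = true :=
    fun c hc => List.mem_takeWhile_imp hc
  conv_rhs => rw [← hdec]
  rw [List.takeWhile_append]
  rw [if_pos (by rw [List.takeWhile_eq_self_iff.mpr (fun x hx => pv_ws_q (hws x hx))])]
  rw [pv_strip_prepend_ws hws]

lemma pv_strip_takeWhile_rstrip (v : List Char) :
    PySem.Chars.strip ((PySem.Chars.rstrip v).takeWhile (fun a => a != ';'))
      = PySem.Chars.strip (v.takeWhile (fun a => a != ';')) := by
  have hdec := pv_rstrip_decomp v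
  have hws : ∀ c ∈ (v.reverse.takeWhile PySem.Chars.isspace).reverse, PySem.Chars.isspace c = true :=
    fun c hc => pv_mem_rtail hc
  by_cases hall : ∀ x ∈ PySem.Chars.rstrip v, (x != ';') = true
  · have h1 : (PySem.Chars.rstrip v).takeWhile (fun a => a != ';') = PySem.Chars.rstrip v :=
      List.takeWhile_eq_self_iff.mpr hall
    conv_rhs => rw [← hdec]
    rw [List.takeWhile_append, if_pos (by rw [h1]), h1]
    rw [List.takeWhile_eq_self_iff.mpr (fun x hx => pv_ws_q (hws x hx))]
    rw [pv_strip_append_ws hws]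
  · have hne : ((PySem.Chars.rstrip v).takeWhile (fun a => a != ';')).length ≠ (PySem.Chars.rstrip v).length := by
      intro hlen
      have heq : (PySem.Chars.rstrip v).takeWhile (fun a => a != ';') = PySem.Chars.rstrip v :=
        List.IsPrefix.eq_of_length (List.takeWhile_prefix _) hlen
      refine hall (fun x hx => ?_)
      have hx' : x ∈ List.takeWhile (fun a => a != ';') (PySem.Chars.rstrip v) := by
        rw [heq]; exact hx
      exact @List.mem_takeWhile_imp Char (fun a => a != ';') (PySem.Chars.rstrip v) x hx'
    conv_rhs => rw [← hdec]
    rw [List.takeWhile_append, if_neg hne]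

lemma pv_splitC_head (c : Char) (l : List Char) :
    PySem.List.pyGetD (pvSplitC c l) 0 [] = l.takeWhile (fun a => a != c) := by
  induction l with
  | nil => simp [pvSplitC, PySem.List.pyGetD, PySem.List.pyGet?, PySem.List.pyIdx?]
  | cons a r ih =>
    by_cases hac : a = c
    · subst hac
      simp [pvSplitC, PySem.List.pyGetD, PySem.List.pyGet?, PySem.List.pyIdx?]
    · simp only [pvSplitC, if_neg hac]
      cases hsp : pvSplitC c r with
      | nil => exact absurd hsp (pvSplitC_ne_nil c r)
      | cons hd tl =>
        rw [hsp] at ih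
        simp only [List.takeWhile_cons]
        rw [show (a != c) = true by simp [hac]]
        simp only [if_true]
        simp [PySem.List.pyGetD, PySem.List.pyGet?, PySem.List.pyIdx?] at ih ⊢
        exact ih

def pvStepA (dependencies : List (List Char)) (line : List Char) : List (List Char) :=
  let line := PySem.Chars.strip line
  if PySem.Chars.startswith line "Requires-Dist:".toList then
    let dep := PySem.Chars.strip (PySem.List.pyGetD (PySem.Chars.splitOnMax line ":".toList 1) 1 [])
    let dep := PySem.Chars.strip (PySem.List.pyGetD (PySem.Chars.splitOn dep ";".toList) 0 [])
    if dep ≠ [] then dependencies ++ [dep] else dependencies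
  else dependencies


def pvStepB (deps : List (List Char)) (l : List Char) : List (List Char) :=
  if "Requires-Dist:".toList.isPrefixOf (l.dropWhile pvLineWs) then
    let dep := PySem.Chars.strip (((l.dropWhile pvLineWs).drop 14).takeWhile pvStop)
    if dep ≠ [] then deps ++ [dep] else deps
  else deps

lemma pv_step_eq (deps : List (List Char)) (l : List Char) (hnl : '\n' ∉ l) :
    pvStepA deps l = pvStepB deps l := by
  have hdw : l.dropWhile pvLineWs = PySem.Chars.lstrip l := by
    simp only [PySem.Chars.lstrip]
    exact pv_dropWhile_congr (fun x hx => by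
      have hx' : x ≠ '\n' := fun h => hnl (h ▸ hx)
      simp [pvLineWs, hx'])
  have hstrip : PySem.Chars.strip l = PySem.Chars.rstrip (PySem.Chars.lstrip l) := rfl
  unfold pvStepA pvStepB
  rw [hdw]
  simp only [PySem.Chars.startswith, hstrip]
  by_cases hpre : "Requires-Dist:".toList.isPrefixOf (PySem.Chars.lstrip l) = true
  · obtain ⟨t, ht⟩ := List.isPrefixOf_iff_prefix.mp hpre
    have hnlt : '\n' ∉ t := by
      intro hmem
      refine hnl ?_
      have h1 : '\n' ∈ PySem.Chars.lstrip l := by rw [← ht]; simp [hmem]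
      exact (List.dropWhile_suffix PySem.Chars.isspace).subset h1
    have hpfx : "Requires-Dist:".toList = "Requires-Dist".toList ++ [':'] := rfl
    have hr : PySem.Chars.rstrip (PySem.Chars.lstrip l)
        = "Requires-Dist:".toList ++ PySem.Chars.rstrip t := by
      rw [← ht, hpfx]
      exact pv_rstrip_append_keep (by decide)
    rw [hr, hpre]
    have hpre2 : "Requires-Dist:".toList.isPrefixOf
        ("Requires-Dist:".toList ++ PySem.Chars.rstrip t) = true := by
      rw [List.isPrefixOf_iff_prefix]; exact List.prefix_append _ _
    rw [if_pos hpre2]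
    -- A's dep
    have hsmax : PySem.Chars.splitOnMax ("Requires-Dist:".toList ++ PySem.Chars.rstrip t) ":".toList 1
        = ["Requires-Dist".toList, PySem.Chars.rstrip t] := by
      rw [show (":".toList = [':']) from rfl, hpfx, List.append_assoc]
      exact pv_splitOnMax_colon _ _ (by decide)
    rw [hsmax]
    rw [show PySem.List.pyGetD ["Requires-Dist".toList, PySem.Chars.rstrip t] 1 [] = PySem.Chars.rstrip t from rfl]
    rw [show (";".toList = [';']) from rfl, pv_splitOn_single]
    rw [pv_splitC_head]
    have hA : PySem.Chars.strip ((PySem.Chars.strip (PySem.Chars.rstrip t)).takeWhile (fun a => a != ';'))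
        = PySem.Chars.strip (t.takeWhile (fun a => a != ';')) := by
      rw [show PySem.Chars.strip (PySem.Chars.rstrip t)
            = PySem.Chars.rstrip (PySem.Chars.lstrip (PySem.Chars.rstrip t)) from rfl]
      rw [pv_strip_takeWhile_rstrip (PySem.Chars.lstrip (PySem.Chars.rstrip t))]
      rw [pv_strip_takeWhile_lstrip (PySem.Chars.rstrip t)]
      rw [pv_strip_takeWhile_rstrip t]
    rw [hA]
    -- B's dep
    have hdrop : (PySem.Chars.lstrip l).drop 14 = t := by
      rw [← ht, show (14 : Nat) = "Requires-Dist:".toList.length from rfl]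
      exact List.drop_left
    rw [hdrop]
    have htw : t.takeWhile pvStop = t.takeWhile (fun a => a != ';') := by
      refine pv_takeWhile_congr (fun x hx => ?_)
      have hx' : x ≠ '\n' := fun h => hnlt (h ▸ hx)
      simp [pvStop, hx']
    rw [htw]
    simp
  · rw [if_neg hpre]
    have hpre2 : "Requires-Dist:".toList.isPrefixOf
        (PySem.Chars.rstrip (PySem.Chars.lstrip l)) = false := by
      rw [Bool.eq_false_iff]
      intro hc
      refine hpre ?_
      rw [List.isPrefixOf_iff_prefix] at hc ⊢
      exact hc.trans (pv_rstrip_prefix _)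
    rw [hpre2]
    simp


lemma pv_dropWhile_nl_append {p : Char → Bool} (hp : p '\n' = false) {l : List Char} (r : List Char)
    (hl : '\n' ∉ l) : (l ++ '\n' :: r).dropWhile p = l.dropWhile p ++ '\n' :: r := by
  rw [List.dropWhile_append]
  by_cases he : (List.dropWhile p l).isEmpty = true
  · rw [if_pos he]
    have : List.dropWhile p l = [] := by simpa using he
    rw [this, List.dropWhile_cons, hp]
    simp
  · rw [if_neg he]

lemma pv_takeWhile_nl_append {p : Char → Bool} (hp : p '\n' = false) {l : List Char} (r : List Char)
    (hl : '\n' ∉ l) : (l ++ '\n' :: r).takeWhile p = l.takeWhile p := by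
  rw [List.takeWhile_append]
  by_cases he : (List.takeWhile p l).length = l.length
  · rw [if_pos he, List.takeWhile_cons, hp]
    simp
    exact (List.IsPrefix.eq_of_length (List.takeWhile_prefix _) he).symm
  · rw [if_neg he]

lemma pv_dropWhile_toNl_all {x : List Char} (hx : '\n' ∉ x) : x.dropWhile pvToNl = [] :=
  List.dropWhile_eq_nil_iff.mpr (fun c hc => by
    have : c ≠ '\n' := fun h => hx (h ▸ hc)
    simp [pvToNl, this])

lemma pv_prefix_nl_append (p : List Char) : ∀ (d r : List Char), '\n' ∉ p → '\n' ∉ d →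
    p.isPrefixOf (d ++ '\n' :: r) = p.isPrefixOf d := by
  induction p with
  | nil => intro d r _ _; cases d <;> simp [List.isPrefixOf]
  | cons a p' ih =>
    intro d r hp hd
    cases d with
    | nil =>
      have ha : a ≠ '\n' := fun h => hp (by simp [h])
      simp [List.isPrefixOf, ha]
    | cons b d' =>
      simp only [List.cons_append, List.isPrefixOf]
      rw [ih d' r (fun h => hp (by simp [h])) (fun h => hd (by simp [h]))]

lemma pv_head_dropWhile_false {p : Char → Bool} : ∀ {l : List Char} {a : Char} {t : List Char},
    l.dropWhile p = a :: t → p a = false := by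
  intro l
  induction l with
  | nil => intro a t h; simp at h
  | cons b r ih =>
    intro a t h
    rw [List.dropWhile_cons] at h
    by_cases hb : p b = true
    · rw [if_pos hb] at h; exact ih h
    · rw [if_neg hb] at h
      cases h
      simpa using hb

lemma pv_splitC_not_mem {c : Char} : ∀ {l : List Char}, c ∉ l → pvSplitC c l = [l] := by
  intro l
  induction l with
  | nil => intro _; rfl
  | cons a r ih =>
    intro h
    have ha : a ≠ c := fun hh => h (by simp [hh])
    simp only [pvSplitC, if_neg ha]
    rw [ih (fun hh => h (by simp [hh]))]

lemma pv_splitC_append {c : Char} : ∀ {l : List Char} (r : List Char), c ∉ l →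
    pvSplitC c (l ++ c :: r) = l :: pvSplitC c r := by
  intro l
  induction l with
  | nil => intro r _; simp [pvSplitC]
  | cons a l' ih =>
    intro r h
    have ha : a ≠ c := fun hh => h (by simp [hh])
    simp only [List.cons_append, pvSplitC, if_neg ha]
    rw [ih r (fun hh => h (by simp [hh]))]

lemma pv_splitC_no_sep {c : Char} : ∀ {l : List Char} {x : List Char}, x ∈ pvSplitC c l → c ∉ x := by
  intro l
  induction l with
  | nil => intro x hx; simp [pvSplitC] at hx; simp [hx]
  | cons a r ih =>
    intro x hx
    by_cases ha : a = c
    · subst ha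
      simp only [pvSplitC, if_pos rfl] at hx
      rcases List.mem_cons.mp hx with h | h
      · simp [h]
      · exact ih h
    · simp only [pvSplitC, if_neg ha] at hx
      cases hsp : pvSplitC c r with
      | nil => exact absurd hsp (pvSplitC_ne_nil c r)
      | cons hd tl =>
        rw [hsp] at hx
        rcases List.mem_cons.mp hx with h | h
        · subst h
          intro hmem
          rcases List.mem_cons.mp hmem with h1 | h1
          · exact ha h1.symm
          · exact ih (by rw [hsp]; simp) h1
        · exact ih (by rw [hsp]; simp [h])

lemma pv_scan_last (l : List Char) (hl : '\n' ∉ l) (deps : List (List Char)) :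
    pvScanB l deps = pvStepB deps l := by
  have hd : '\n' ∉ l.dropWhile pvLineWs := fun h => hl ((List.dropWhile_suffix _).subset h)
  have hd2 : '\n' ∉ (((l.dropWhile pvLineWs).drop 14).dropWhile pvStop) := fun h =>
    hd ((List.drop_suffix _ _).subset ((List.dropWhile_suffix _).subset h))
  rw [pvScanB, pv_dropWhile_toNl_all hd2, pv_dropWhile_toNl_all hd]
  rfl

lemma pv_scan_append (l r : List Char) (hl : '\n' ∉ l) (deps : List (List Char)) :
    pvScanB (l ++ '\n' :: r) deps = pvScanB r (pvStepB deps l) := by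
  have hws : pvLineWs '\n' = false := by simp [pvLineWs]
  have hst : pvStop '\n' = false := by simp [pvStop]
  have hd : '\n' ∉ l.dropWhile pvLineWs := fun h => hl ((List.dropWhile_suffix _).subset h)
  have hdw := pv_dropWhile_nl_append hws r hl
  rw [pvScanB, hdw]
  rw [pv_prefix_nl_append _ _ _ (by decide) hd]
  unfold pvStepB
  by_cases hc : "Requires-Dist:".toList.isPrefixOf (l.dropWhile pvLineWs) = true
  · rw [if_pos hc, if_pos hc]
    obtain ⟨t, ht⟩ := List.isPrefixOf_iff_prefix.mp hc
    have hlen : 14 ≤ (l.dropWhile pvLineWs).length := by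
      rw [← ht]; simp
    have hdrop : (l.dropWhile pvLineWs ++ '\n' :: r).drop 14
        = (l.dropWhile pvLineWs).drop 14 ++ '\n' :: r := List.drop_append_of_le_length hlen
    have hnt : '\n' ∉ (l.dropWhile pvLineWs).drop 14 := fun h =>
      hd ((List.drop_suffix _ _).subset h)
    have hnt2 : '\n' ∉ ((l.dropWhile pvLineWs).drop 14).dropWhile pvStop := fun h =>
      hnt ((List.dropWhile_suffix _).subset h)
    rw [hdrop, pv_takeWhile_nl_append hst r hnt, pv_dropWhile_nl_append hst r hnt,
        pv_dropWhile_nl_append (by simp [pvToNl]) r hnt2, pv_dropWhile_toNl_all hnt2]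
    rfl
  · rw [if_neg hc, if_neg hc]
    rw [pv_dropWhile_nl_append (by simp [pvToNl]) r hd, pv_dropWhile_toNl_all hd]
    rfl

lemma pv_scan_foldl : ∀ (n : Nat) (cs : List Char), cs.length ≤ n → ∀ (deps : List (List Char)),
    pvScanB cs deps = (pvSplitC '\n' cs).foldl pvStepB deps := by
  intro n
  induction n with
  | zero =>
    intro cs hn deps
    have : cs = [] := List.length_eq_zero_iff.mp (Nat.le_zero.mp hn)
    subst this
    rw [pv_scan_last [] (by simp) deps]
    simp [pvSplitC]
  | succ m ih =>
    intro cs hn deps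
    by_cases hmem : '\n' ∈ cs
    · cases hdrop : cs.dropWhile pvToNl with
      | nil =>
        exfalso
        have := List.dropWhile_eq_nil_iff.mp hdrop '\n' hmem
        simp [pvToNl] at this
      | cons c0 rest =>
        have hc0 : c0 = '\n' := by
          have := pv_head_dropWhile_false hdrop
          simpa [pvToNl] using this
        subst hc0
        have hdec : cs.takeWhile pvToNl ++ '\n' :: rest = cs := by
          rw [← hdrop]; exact List.takeWhile_append_dropWhile
        have hnl : '\n' ∉ cs.takeWhile pvToNl := fun h => by
          have := List.mem_takeWhile_imp h
          simp [pvToNl] at this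
        have hrest : rest.length ≤ m := by
          have : (cs.takeWhile pvToNl ++ '\n' :: rest).length = cs.length := by rw [hdec]
          simp at this
          omega
        calc pvScanB cs deps
            = pvScanB (cs.takeWhile pvToNl ++ '\n' :: rest) deps := by rw [hdec]
          _ = pvScanB rest (pvStepB deps (cs.takeWhile pvToNl)) := pv_scan_append _ _ hnl _
          _ = (pvSplitC '\n' rest).foldl pvStepB (pvStepB deps (cs.takeWhile pvToNl)) := ih rest hrest _
          _ = (pvSplitC '\n' cs).foldl pvStepB deps := by
              conv_rhs => rw [← hdec]
              rw [pv_splitC_append rest hnl]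
              rfl
    · rw [pv_scan_last cs hmem deps, pv_splitC_not_mem hmem]
      rfl

-- ===== VERDICT (by name: the statement is the Claim_ definition above) =====
theorem parse_metadata_dependencies_py_spec : Claim_equal_parse_metadata_dependencies_py := by
  intro content _
  unfold Spec_parse_metadata_dependencies_py
  show parse_metadata_dependencies_py content = parse_metadata_dependencies_py_alt content
  unfold parse_metadata_dependencies_py parse_metadata_dependencies_py_alt
  congr 1
  rw [show ("\n".toList = ['\n']) from rfl, pv_splitOn_single]
  show (pvSplitC '\n' content.toList).foldl pvStepA [] = pvScanB content.toList []
  have hstep : (pvSplitC '\n' content.toList).foldl pvStepA []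
      = (pvSplitC '\n' content.toList).foldl pvStepB [] :=
    PySem.List.foldl_congr_mem' _ pvStepA pvStepB [] (fun x hx acc => pv_step_eq acc x (pv_splitC_no_sep hx))
  rw [hstep, ← pv_scan_foldl content.toList.length content.toList le_rfl []]
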